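-- pv_equiv track=rewrite | github.com/Ag3ntOhm/IoT-S4 | 3_3_5_1_A/main.py | convert
-- ===== SOURCE A (Python) =====
-- def convert(Song) :
--     L = []
--     s = ""
--     i = 0
--     while i < len(Song) :
--         if (i != 0 and i % 4 == 0) :
--             L.append(s)
--             s = ""
--         t = Song[i]
--         if (t == ',') :
--             if (i % 2 != 1) :
--                 raise SyntaxError("Song invalid syntax")
--             if (len(s) == 1) :
--                 s+= '2/'
--             i += 1
--         else :
--             s += t
--             i += 1
--     L.append(s)
--     return L
-- ===== SOURCE B (Python) =====
-- def convert(Song):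
--     L = []
--     n = len(Song)
--     for start in range(0, n or 1, 4):
--         s = ""
--         for j in range(start, min(start + 4, n)):
--             c = Song[j]
--             if c == ',':
--                 if j % 2 != 1:
--                     raise SyntaxError("Song invalid syntax")
--                 if len(s) == 1:
--                     s += '2/'
--             else:
--                 s += c
--         L.append(s)
--     return L
-- ===== Notes on version B (the rewrite author's own statement) =====
-- stated objective: alternative
-- what changed: Replaced A's single flat while-loop state machine (index counter with an in-loop flush at every multiple of 4) by a nested decomposition: an outer loop over fixed 4-wide window starts (range(0, n or 1, 4)) and an inner loop that builds each chunk from its window's characters.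
import Mathlib
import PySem

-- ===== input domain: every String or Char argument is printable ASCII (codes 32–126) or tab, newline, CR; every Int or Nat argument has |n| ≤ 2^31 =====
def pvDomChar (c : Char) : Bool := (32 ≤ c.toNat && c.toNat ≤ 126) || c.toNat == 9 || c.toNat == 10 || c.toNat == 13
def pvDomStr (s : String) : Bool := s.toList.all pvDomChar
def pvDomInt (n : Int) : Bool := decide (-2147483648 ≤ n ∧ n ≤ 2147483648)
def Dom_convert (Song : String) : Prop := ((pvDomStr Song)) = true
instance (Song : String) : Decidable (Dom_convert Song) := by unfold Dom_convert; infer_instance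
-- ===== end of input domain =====

-- B re-decomposes A's flat index-driven state machine into an outer loop over 4-wide windows
-- with an inner loop building each chunk; same return value (objective: alternative decomposition).

-- ===== PORT A =====
-- A's while loop: state (L, s, i); flush s into L at every i with i ≠ 0 and i % 4 == 0;
-- a comma at an even index raises SyntaxError (= none here; excluded by Pre_convert).
def convertGoA : List Char → Nat → List String → List Char → Option (List String)
  | [], _, L, s => some (L ++ [String.ofList s])
  | c :: rest, i, L, s =>
    let P := if i ≠ 0 ∧ i % 4 = 0 then (L ++ [String.ofList s], ([] : List Char)) else (L, s)
    if c = ',' then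
      if ¬ (i % 2 = 1) then none
      else if P.2.length = 1 then convertGoA rest (i + 1) P.1 (P.2 ++ ['2', '/'])
      else convertGoA rest (i + 1) P.1 P.2
    else convertGoA rest (i + 1) P.1 (P.2 ++ [c])

def convert (Song : String) : List String :=
  (convertGoA Song.toList 0 [] []).getD []

-- ===== PORT B =====
-- B's inner loop: for j in range(start, min(start+4, n)), building chunk s.
def convertInnerB (cs : List Char) : List Int → List Char → Option (List Char)
  | [], s => some s
  | j :: js, s =>
    match PySem.List.pyGet? cs j with
    | none => none
    | some c =>
      if c = ',' then
        if ¬ (PySem.Int.mod j 2 = 1) then none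
        else if s.length = 1 then convertInnerB cs js (s ++ ['2', '/'])
        else convertInnerB cs js s
      else convertInnerB cs js (s ++ [c])

-- B's outer loop: for start in range(0, n or 1, 4), appending each chunk to L.
def convertOuterB (cs : List Char) : List Int → List String → Option (List String)
  | [], L => some L
  | st :: sts, L =>
    match convertInnerB cs (PySem.List.pyRange st (min (st + 4) (PySem.List.len cs)) 1) [] with
    | none => none
    | some s => convertOuterB cs sts (L ++ [String.ofList s])

def convert_alt (Song : String) : List String :=
  let cs := Song.toList
  let n := PySem.List.len cs
  (convertOuterB cs (PySem.List.pyRange 0 (if n = 0 then 1 else n) 4) []).getD []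

-- ===== PRECONDITION & SPEC =====
-- Pre_ excludes exactly the inputs with a comma at an even index, where A (and B) raise SyntaxError.
def Pre_convert (Song : String) : Prop :=
  ∀ i ∈ List.range Song.toList.length, Song.toList[i]? = some ',' → i % 2 = 1
instance (Song : String) : Decidable (Pre_convert Song) := by unfold Pre_convert; infer_instance

def pvWitness_convert : String := "a,b,c"

def Spec_convert (Song : String) (out : List String) : Prop := out = convert_alt Song
instance (Song : String) (out : List String) : Decidable (Spec_convert Song out) := by unfold Spec_convert; infer_instance

-- ===== CLAIM (what is proved, stated in full; the proofs are below) =====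
def Claim_equal_convert : Prop := ∀ (Song : String), Dom_convert Song → Pre_convert Song → Spec_convert Song (convert Song)

-- ===== LEMMAS AND PROOFS =====

-- the per-character transition both programs apply inside a window
def stepC (s : List Char) (c : Char) : List Char :=
  if c = ',' then (if s.length = 1 then s ++ ['2', '/'] else s) else s ++ [c]

-- fold stepC over indices a..b-1
def chunkAcc (cs : List Char) (a b : Nat) (s : List Char) : List Char :=
  if _h : a < b then chunkAcc cs (a + 1) b (stepC s (cs.getD a ' ')) else s
termination_by b - a

-- the chunks of all windows starting at b, b+4, b+8, …
def chunksFrom (cs : List Char) (b : Nat) : List String :=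
  if _h : b < cs.length then
    String.ofList (chunkAcc cs b (min (b + 4) cs.length) []) :: chunksFrom cs (b + 4)
  else []
termination_by cs.length - b

lemma chunkAcc_stop (cs : List Char) (a b : Nat) (s : List Char) (h : ¬ a < b) :
    chunkAcc cs a b s = s := by rw [chunkAcc]; simp [h]

lemma chunkAcc_step (cs : List Char) (a b : Nat) (s : List Char) (h : a < b) :
    chunkAcc cs a b s = chunkAcc cs (a + 1) b (stepC s (cs.getD a ' ')) := by
  rw [chunkAcc]; simp [h]

lemma chunksFrom_stop (cs : List Char) (b : Nat) (h : ¬ b < cs.length) :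
    chunksFrom cs b = [] := by rw [chunksFrom]; simp [h]

lemma chunksFrom_step (cs : List Char) (b : Nat) (h : b < cs.length) :
    chunksFrom cs b =
      String.ofList (chunkAcc cs b (min (b + 4) cs.length) []) :: chunksFrom cs (b + 4) := by
  rw [chunksFrom]; simp [h]

lemma pyRange4_nil (a b : Int) (h : b ≤ a) : PySem.List.pyRange a b 4 = [] := by
  rw [PySem.List.pyRange_of_pos _ _ (by norm_num)]
  simp [show ¬ a < b by omega]

lemma pyRange4_cons (a b : Int) (h : a < b) :
    PySem.List.pyRange a b 4 = a :: PySem.List.pyRange (a + 4) b 4 := by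
  rw [PySem.List.pyRange_of_pos _ _ (by norm_num), PySem.List.pyRange_of_pos _ _ (by norm_num)]
  have hn : ((b - a + 4 - 1) / 4).toNat
      = (if a + 4 < b then ((b - (a + 4) + 4 - 1) / 4).toNat else 0) + 1 := by
    split_ifs <;> omega
  simp only [h, if_true, hn, List.range_succ_eq_map, List.map_cons, List.map_map]
  congr 1
  · simp
  · apply List.map_congr_left; intro k _; simp only [Function.comp]; push_cast; ring

-- A's walk, stated for both entry shapes (mid-window / window boundary), by joint induction
lemma A_walk (cs : List Char)
    (hP : ∀ i, (h : i < cs.length) → cs[i] = ',' → i % 2 = 1) :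
    ∀ d : Nat,
      (∀ j s L, cs.length - j ≤ d → j ≤ cs.length → (j = 0 ∨ j % 4 ≠ 0) →
        convertGoA (cs.drop j) j L s =
          some (L ++ String.ofList (chunkAcc cs j (min (4 * (j / 4) + 4) cs.length) s)
                  :: chunksFrom cs (4 * (j / 4) + 4))) ∧
      (∀ j s L, cs.length - j ≤ d → j ≤ cs.length → j % 4 = 0 → j ≠ 0 →
        convertGoA (cs.drop j) j L s = some (L ++ String.ofList s :: chunksFrom cs j)) := by
  intro d
  induction d with
  | zero =>
    constructor
    · intro j s L hd hj _
      have hje : j = cs.length := by omega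
      subst hje
      rw [List.drop_length, convertGoA,
        chunkAcc_stop _ _ _ _ (by omega),
        chunksFrom_stop _ _ (by omega)]
    · intro j s L hd hj _ _
      have hje : j = cs.length := by omega
      subst hje
      rw [List.drop_length, convertGoA, chunksFrom_stop _ _ (by omega)]
  | succ d ih =>
    constructor
    · intro j s L hd hj hj0
      by_cases hlt : j < cs.length
      · rw [List.drop_eq_getElem_cons hlt, convertGoA]
        have hfl : ¬ (j ≠ 0 ∧ j % 4 = 0) := by omega
        simp only [hfl, if_false]
        have hstep : ∀ s' : List Char,
            (if cs[j] = ',' then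
              if ¬ (j % 2 = 1) then none
              else if s'.length = 1 then convertGoA (cs.drop (j+1)) (j+1) L (s' ++ ['2','/'])
              else convertGoA (cs.drop (j+1)) (j+1) L s'
            else convertGoA (cs.drop (j+1)) (j+1) L (s' ++ [cs[j]]))
            = convertGoA (cs.drop (j+1)) (j+1) L (stepC s' cs[j]) := by
          intro s'
          by_cases hc : cs[j] = ','
          · have h2 : j % 2 = 1 := hP j hlt hc
            simp only [hc, if_true, h2, not_true, if_false, stepC]
            split_ifs <;> rfl
          · simp [hc, stepC]
        rw [hstep]
        have hget : cs.getD j ' ' = cs[j] := List.getD_eq_getElem cs ' ' hlt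
        by_cases hb : (j + 1) % 4 = 0
        · -- window boundary after this char
          have hw : 4 * (j / 4) + 4 = j + 1 := by omega
          rw [(ih.2) (j+1) (stepC s cs[j]) L (by omega) (by omega) hb (by omega), hw]
          rw [chunkAcc_step _ _ _ _ (by omega), hget]
          rw [chunkAcc_stop _ _ _ _ (by omega)]

        · have hq : (j + 1) / 4 = j / 4 := by omega
          rw [(ih.1) (j+1) (stepC s cs[j]) L (by omega) (by omega) (Or.inr hb), hq]
          rw [chunkAcc_step cs j (min (4 * (j / 4) + 4) cs.length) s (by omega), hget]
      · have hje : j = cs.length := by omega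
        subst hje
        rw [List.drop_length, convertGoA,
          chunkAcc_stop _ _ _ _ (by omega),
          chunksFrom_stop _ _ (by omega)]
    · intro j s L hd hj h4 h0
      by_cases hlt : j < cs.length
      · rw [List.drop_eq_getElem_cons hlt, convertGoA]
        have hfl : (j ≠ 0 ∧ j % 4 = 0) := ⟨h0, h4⟩
        simp only [if_pos hfl]
        have hc : ¬ cs[j] = ',' := by
          intro hc
          have := hP j hlt hc
          omega
        simp only [hc, if_false, List.nil_append]
        have hb : ¬ (j + 1) % 4 = 0 := by omega
        have hq : (j + 1) / 4 = j / 4 := by omega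
        have hq4 : 4 * (j / 4) = j := by omega
        rw [(ih.1) (j+1) [cs[j]] (L ++ [String.ofList s]) (by omega) (by omega) (Or.inr hb), hq, hq4]
        rw [chunksFrom_step _ _ hlt,
          chunkAcc_step cs j (min (j + 4) cs.length) [] (by omega)]
        have hget : cs.getD j ' ' = cs[j] := List.getD_eq_getElem cs ' ' hlt
        rw [hget]
        simp [stepC, hc]
      · have hje : j = cs.length := by omega
        subst hje
        rw [List.drop_length, convertGoA, chunksFrom_stop _ _ (by omega)]

-- B's inner loop computes chunkAcc
lemma B_inner (cs : List Char)
    (hP : ∀ i, (h : i < cs.length) → cs[i] = ',' → i % 2 = 1) :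
    ∀ d (a b : Nat) (s : List Char), b - a ≤ d → b ≤ cs.length →
      convertInnerB cs (PySem.List.pyRange (a : Int) (b : Int) 1) s = some (chunkAcc cs a b s) := by
  intro d
  induction d with
  | zero =>
    intro a b s hd hb
    rw [PySem.List.pyRange_one_eq_nil (by omega), convertInnerB, chunkAcc_stop _ _ _ _ (by omega)]
  | succ d ih =>
    intro a b s hd hb
    by_cases hab : a < b
    · rw [PySem.List.pyRange_one_cons (by exact_mod_cast hab), convertInnerB]
      have ha : a < cs.length := by omega
      have hget : PySem.List.pyGet? cs (a : Int) = some cs[a] := by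
        rw [PySem.List.pyGet?_natCast]; exact List.getElem?_eq_getElem ha
      rw [hget]
      have hcast : ((a : Int) + 1) = ((a + 1 : Nat) : Int) := by push_cast; ring
      have hmod : PySem.Int.mod (a : Int) 2 = (a : Int) % 2 :=
        PySem.Int.mod_eq_emod_of_pos (by norm_num)
      rw [chunkAcc_step _ _ _ _ hab, List.getD_eq_getElem cs ' ' ha]
      by_cases hc : cs[a] = ','
      · have h2 : a % 2 = 1 := hP a ha hc
        have h2' : PySem.Int.mod (a : Int) 2 = 1 := by rw [hmod]; omega
        simp only [hc, if_true, h2', not_true, if_false, stepC, hcast]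
        split_ifs with hl
        · exact ih (a+1) b _ (by omega) hb
        · exact ih (a+1) b _ (by omega) hb
      · simp only [hc, if_false, stepC, hcast]
        exact ih (a+1) b _ (by omega) hb
    · rw [PySem.List.pyRange_one_eq_nil (by exact_mod_cast (by omega : b ≤ a)), convertInnerB,
        chunkAcc_stop _ _ _ _ hab]

-- B's outer loop produces chunksFrom
lemma B_outer (cs : List Char)
    (hP : ∀ i, (h : i < cs.length) → cs[i] = ',' → i % 2 = 1) :
    ∀ d (b : Nat) (L : List String), cs.length - b ≤ d →
      convertOuterB cs (PySem.List.pyRange (b : Int) (cs.length : Int) 4) L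
        = some (L ++ chunksFrom cs b) := by
  intro d
  induction d with
  | zero =>
    intro b L hd
    rw [pyRange4_nil _ _ (by exact_mod_cast (by omega : cs.length ≤ b)), convertOuterB,
      chunksFrom_stop _ _ (by omega)]
    simp
  | succ d ih =>
    intro b L hd
    by_cases hb : b < cs.length
    · rw [pyRange4_cons _ _ (by exact_mod_cast hb), convertOuterB]
      have hmin : min ((b : Int) + 4) (PySem.List.len cs) = ((min (b + 4) cs.length : Nat) : Int) := by
        rw [PySem.List.len_eq]; push_cast; ring_nf
      rw [hmin, B_inner cs hP (min (b + 4) cs.length) b (min (b + 4) cs.length) []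
        (by omega) (by omega)]
      dsimp only
      have hcast : ((b : Int) + 4) = ((b + 4 : Nat) : Int) := by push_cast; ring
      rw [hcast, ih (b + 4) (L ++ [String.ofList (chunkAcc cs b (min (b + 4) cs.length) [])]) (by omega),
        chunksFrom_step _ _ hb]
      simp
    · rw [pyRange4_nil _ _ (by exact_mod_cast (by omega : cs.length ≤ b)), convertOuterB,
        chunksFrom_stop _ _ (by omega)]
      simp

-- ===== VERDICT (by name: the statement is the Claim_ definition above) =====
theorem convert_spec : Claim_equal_convert := by
  intro Song _ hPre
  simp only [Spec_convert, convert, convert_alt]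
  have hP : ∀ i, (h : i < Song.toList.length) → Song.toList[i] = ',' → i % 2 = 1 := by
    intro i h hc
    exact hPre i (List.mem_range.mpr h) (by rw [List.getElem?_eq_getElem h, hc])
  set cs := Song.toList with hcs
  by_cases hn : cs.length = 0
  · have he : cs = [] := List.length_eq_zero_iff.mp hn
    rw [he]; rfl
  · have hlen : PySem.List.len cs = (cs.length : Int) := PySem.List.len_eq cs
    have hne : ¬ PySem.List.len cs = 0 := by rw [hlen]; exact_mod_cast hn
    rw [hlen, if_neg (by exact_mod_cast hn : ¬ (cs.length : Int) = 0)]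
    have hB := B_outer cs hP cs.length 0 [] (by omega)
    norm_num at hB
    have hA := (A_walk cs hP cs.length).1 0 [] [] (by omega) (by omega) (Or.inl rfl)
    rw [List.drop_zero] at hA
    rw [hA, hB]
    simp only [Option.getD_some, List.nil_append]
    conv_rhs => rw [chunksFrom_step cs 0 (by omega)]
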